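-- pv_equiv track=rewrite | github.com/avitalkalimi/Python_HW4 | hw4.py | helper_drainage_basins
-- ===== SOURCE A (Python) =====
-- def helper_drainage_basins(elevation_histogram, lindex, lvalue, count):
--     lvalue.append(elevation_histogram[0]) #שומר את המספרים שהוא עומד למחוק
--     count += 1
--     if len(elevation_histogram) > 1: #תנאי עצירה
--         if elevation_histogram[0] < elevation_histogram[1]: #אם הנוכחי קטן מהבא
--             if len(lindex) < 1:
--                 lindex.append(count)
--             elif elevation_histogram[0] < lvalue[-2]: # בודק את הנוכחי ביחס לאלו שנמחקו
--                 lindex.append(count)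
--         elif len(elevation_histogram) == 2: #אם האורך הוא 2
--             if elevation_histogram[0] > elevation_histogram[1]: #אם האחרון קטן יותר
--                 count += 1 #תעדכן אינדקס
--                 lindex.append(count) #תוסיף אינדקס לרשימת האינדקסים של האגנים
--         helper_drainage_basins(elevation_histogram[1:], lindex, lvalue, count) #תקרא מחדש לפונקציה ללא האיבר הראשון
--     return lindex
-- ===== SOURCE B (Python) =====
-- # Single left-to-right pass with an index pointer (no recursive slicing); performs
-- # the same in-place appends to lindex and lvalue as the original.
-- def helper_drainage_basins(elevation_histogram, lindex, lvalue, count):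
--     n = len(elevation_histogram)
--     prev = lvalue[-1] if lvalue else None
--     i = 0
--     while i < n:
--         cur = elevation_histogram[i]
--         c = count + i + 1
--         if i < n - 1:
--             nxt = elevation_histogram[i + 1]
--             if cur < nxt:
--                 if not lindex:
--                     lindex.append(c)
--                 elif prev is not None and cur < prev:
--                     lindex.append(c)
--             elif i == n - 2 and cur > nxt:
--                 lindex.append(c + 1)
--         lvalue.append(cur)
--         prev = cur
--         i += 1
--     return lindex
-- ===== Notes on version B (the rewrite author's own statement) =====
-- stated objective: faster
-- what changed: Replaces the recursion that re-slices elevation_histogram[1:] at every step (a fresh list copy per element) with a single left-to-right index loop that tracks the previously deleted value, eliminating both the slicing and the recursion depth.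
import Mathlib
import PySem

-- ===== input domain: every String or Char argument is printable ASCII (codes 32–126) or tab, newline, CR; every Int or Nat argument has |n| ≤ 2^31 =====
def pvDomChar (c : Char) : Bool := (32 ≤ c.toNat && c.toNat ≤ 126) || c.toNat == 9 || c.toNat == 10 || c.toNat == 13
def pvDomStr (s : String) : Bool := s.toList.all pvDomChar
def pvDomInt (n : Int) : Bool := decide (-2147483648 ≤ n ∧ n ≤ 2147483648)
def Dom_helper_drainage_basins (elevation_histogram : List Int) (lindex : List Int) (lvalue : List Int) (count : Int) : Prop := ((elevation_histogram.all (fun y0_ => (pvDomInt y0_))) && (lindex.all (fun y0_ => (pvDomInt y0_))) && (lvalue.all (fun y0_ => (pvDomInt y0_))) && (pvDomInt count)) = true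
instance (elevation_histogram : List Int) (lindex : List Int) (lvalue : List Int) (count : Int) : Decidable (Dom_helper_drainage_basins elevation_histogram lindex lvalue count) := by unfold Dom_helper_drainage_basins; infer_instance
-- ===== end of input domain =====

-- B replaces A's recursion on elevation_histogram[1:] (one list copy per element) by a single
-- index-pointer pass tracking the previously deleted value; same return value and same in-place
-- appends to lindex/lvalue on all admitted inputs (the equivalence proved is about the return value).

-- ===== PORT A =====
def helper_drainage_basins (elevation_histogram : List Int) (lindex : List Int) (lvalue : List Int) (count : Int) : List Int :=
  match elevation_histogram with
  | [] => lindex  -- Python raises IndexError here (excluded by Pre_)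
  | h0 :: rest =>
    let lvalue' := lvalue ++ [h0]
    let count' := count + 1
    match rest with
    | [] => lindex
    | h1 :: rest' =>
      if h0 < h1 then
        if lindex.length < 1 then
          helper_drainage_basins rest (lindex ++ [count']) lvalue' count'
        else
          match PySem.List.pyGet? lvalue' (-2) with
          | some v =>
            if h0 < v then helper_drainage_basins rest (lindex ++ [count']) lvalue' count'
            else helper_drainage_basins rest lindex lvalue' count'
          | none => lindex  -- Python raises IndexError here (excluded by Pre_)
      else if rest' = [] then
        if h0 > h1 then
          helper_drainage_basins rest (lindex ++ [count' + 1]) lvalue' (count' + 1)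
        else helper_drainage_basins rest lindex lvalue' count'
      else helper_drainage_basins rest lindex lvalue' count'

-- ===== PORT B =====
-- the while loop of Source B: i is the index pointer, prev the last value appended to lvalue
def hdbLoop (elevation_histogram : List Int) (lindex : List Int) (prev : Option Int) (count : Int) (i : Nat) : List Int :=
  if _hi : i < elevation_histogram.length then
    let cur := elevation_histogram.getD i 0
    let c := count + (i : Int) + 1
    let lindex' :=
      if i < elevation_histogram.length - 1 then
        let nxt := elevation_histogram.getD (i + 1) 0
        if cur < nxt then
          if lindex = [] then lindex ++ [c]
          else
            match prev with
            | some p => if cur < p then lindex ++ [c] else lindex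
            | none => lindex
        else if i = elevation_histogram.length - 2 then
          if cur > nxt then lindex ++ [c + 1] else lindex
        else lindex
      else lindex
    hdbLoop elevation_histogram lindex' (some cur) count (i + 1)
  else lindex
termination_by elevation_histogram.length - i

def helper_drainage_basins_alt (elevation_histogram : List Int) (lindex : List Int) (lvalue : List Int) (count : Int) : List Int :=
  hdbLoop elevation_histogram lindex lvalue.getLast? count 0

-- ===== PRECONDITION & SPEC =====
-- Pre_ excludes exactly the inputs where A raises IndexError: an empty histogram
-- (elevation_histogram[0]) and the first-step lvalue[-2] access on a too-short lvalue.
def Pre_helper_drainage_basins (elevation_histogram : List Int) (lindex : List Int) (lvalue : List Int) (count : Int) : Prop :=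
  elevation_histogram ≠ [] ∧
  ¬(lvalue = [] ∧ lindex ≠ [] ∧ 2 ≤ elevation_histogram.length ∧
    elevation_histogram.getD 0 0 < elevation_histogram.getD 1 0)
instance (elevation_histogram : List Int) (lindex : List Int) (lvalue : List Int) (count : Int) : Decidable (Pre_helper_drainage_basins elevation_histogram lindex lvalue count) := by unfold Pre_helper_drainage_basins; infer_instance

def pvWitness_helper_drainage_basins : List Int × List Int × List Int × Int := ([1, 2, 1, 3], [], [], 0)

def Spec_helper_drainage_basins (elevation_histogram : List Int) (lindex : List Int) (lvalue : List Int) (count : Int) (out : List Int) : Prop := out = helper_drainage_basins_alt elevation_histogram lindex lvalue count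
instance (elevation_histogram : List Int) (lindex : List Int) (lvalue : List Int) (count : Int) (out : List Int) : Decidable (Spec_helper_drainage_basins elevation_histogram lindex lvalue count out) := by unfold Spec_helper_drainage_basins; infer_instance

-- ===== CLAIM (what is proved, stated in full; the proofs are below) =====
def Claim_equal_helper_drainage_basins : Prop := ∀ (elevation_histogram : List Int) (lindex : List Int) (lvalue : List Int) (count : Int), Dom_helper_drainage_basins elevation_histogram lindex lvalue count → Pre_helper_drainage_basins elevation_histogram lindex lvalue count → Spec_helper_drainage_basins elevation_histogram lindex lvalue count (helper_drainage_basins elevation_histogram lindex lvalue count)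

-- ===== LEMMAS AND PROOFS =====

-- list-structured description of the single pass (proof intermediary)
def hdbGo : List Int → List Int → Option Int → Int → List Int
  | [], lindex, _, _ => lindex
  | [_], lindex, _, _ => lindex
  | cur :: nxt :: rest2, lindex, prev, c0 =>
    let c := c0 + 1
    let lindex' :=
      if cur < nxt then
        if lindex = [] then lindex ++ [c]
        else
          match prev with
          | some p => if cur < p then lindex ++ [c] else lindex
          | none => lindex
      else if rest2 = [] then
        if cur > nxt then lindex ++ [c + 1] else lindex
      else lindex
    hdbGo (nxt :: rest2) lindex' (some cur) c

lemma hdbGo_single (x : Int) (lindex : List Int) (prev : Option Int) (c : Int) :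
    hdbGo [x] lindex prev c = lindex := by simp [hdbGo]

lemma pyGet_neg2_append (xs : List Int) (a : Int) (hx : xs ≠ []) :
    PySem.List.pyGet? (xs ++ [a]) (-2) = xs.getLast? := by
  have hlen : 0 < xs.length := List.length_pos_iff.2 hx
  rw [PySem.List.pyGet?_neg_ofNat (xs ++ [a]) 2 (by omega) (by simp; omega)]
  have h1 : (xs ++ [a]).length - 2 = xs.length - 1 := by simp
  rw [h1, List.getElem?_append_left (by omega), List.getLast?_eq_getElem?]

-- one-step unfolding of port A on a list of length ≥ 2
lemma A_step (h0 h1 : Int) (rest' lindex lvalue : List Int) (count : Int) :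
    helper_drainage_basins (h0 :: h1 :: rest') lindex lvalue count =
      (if h0 < h1 then
        if lindex.length < 1 then
          helper_drainage_basins (h1 :: rest') (lindex ++ [count + 1]) (lvalue ++ [h0]) (count + 1)
        else
          match PySem.List.pyGet? (lvalue ++ [h0]) (-2) with
          | some v =>
            if h0 < v then
              helper_drainage_basins (h1 :: rest') (lindex ++ [count + 1]) (lvalue ++ [h0]) (count + 1)
            else helper_drainage_basins (h1 :: rest') lindex (lvalue ++ [h0]) (count + 1)
          | none => lindex
      else if rest' = [] then
        if h0 > h1 then
          helper_drainage_basins (h1 :: rest') (lindex ++ [count + 1 + 1]) (lvalue ++ [h0]) (count + 1 + 1)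
        else helper_drainage_basins (h1 :: rest') lindex (lvalue ++ [h0]) (count + 1)
      else helper_drainage_basins (h1 :: rest') lindex (lvalue ++ [h0]) (count + 1)) := rfl

-- A equals the single pass whenever lvalue is non-empty
lemma A_eq_go (elevation_histogram : List Int) :
    ∀ (lindex lvalue : List Int) (count : Int), lvalue ≠ [] →
      helper_drainage_basins elevation_histogram lindex lvalue count
        = hdbGo elevation_histogram lindex lvalue.getLast? count := by
  induction elevation_histogram with
  | nil => intro lindex lvalue count _; simp [helper_drainage_basins, hdbGo]
  | cons h0 rest ih =>
    intro lindex lvalue count hlv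
    match rest with
    | [] => simp [helper_drainage_basins, hdbGo_single]
    | h1 :: rest' =>
      have hne : lvalue ++ [h0] ≠ [] := by simp
      have hlast : (lvalue ++ [h0]).getLast? = some h0 := List.getLast?_concat
      obtain ⟨p, hp⟩ : ∃ p, lvalue.getLast? = some p := by
        cases h : lvalue.getLast? with
        | none => exact absurd (List.getLast?_eq_none_iff.1 h) hlv
        | some p => exact ⟨p, rfl⟩
      have hget : PySem.List.pyGet? (lvalue ++ [h0]) (-2) = some p := by
        rw [pyGet_neg2_append _ _ hlv, hp]
      rw [A_step, hp]
      by_cases h01 : h0 < h1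
      · by_cases hli : lindex = []
        · have h1len : lindex.length < 1 := by simp [hli]
          rw [if_pos h01, if_pos h1len, ih _ _ _ hne, hlast]
          simp [hdbGo, h01, hli]
        · have h1len : ¬ lindex.length < 1 := by
            simp only [Nat.lt_one_iff, List.length_eq_zero_iff]; exact hli
          rw [if_pos h01, if_neg h1len]
          simp only [hget]
          by_cases hp0 : h0 < p
          · rw [if_pos hp0, ih _ _ _ hne, hlast]; simp [hdbGo, h01, hli, hp0]
          · rw [if_neg hp0, ih _ _ _ hne, hlast]; simp [hdbGo, h01, hli, hp0]
      · by_cases hr : rest' = []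
        · by_cases hgt : h0 > h1
          · rw [if_neg h01, if_pos hr, if_pos hgt, ih _ _ _ hne, hlast]
            subst hr
            simp [hdbGo, h01, hgt]
          · rw [if_neg h01, if_pos hr, if_neg hgt, ih _ _ _ hne, hlast]
            subst hr
            simp [hdbGo, h01, hgt]
        · rw [if_neg h01, if_neg hr, ih _ _ _ hne, hlast]
          simp [hdbGo, h01, hr]

-- the index loop equals the single pass on the dropped suffix
lemma loop_eq_go (elevation_histogram : List Int) :
    ∀ (n i : Nat), elevation_histogram.length - i = n →
      ∀ (lindex : List Int) (prev : Option Int) (count : Int),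
        hdbLoop elevation_histogram lindex prev count i
          = hdbGo (elevation_histogram.drop i) lindex prev (count + (i : Int)) := by
  intro n
  induction n with
  | zero =>
    intro i hi lindex prev count
    have h1 : ¬ i < elevation_histogram.length := by omega
    rw [hdbLoop, dif_neg h1, List.drop_eq_nil_of_le (Nat.not_lt.mp h1)]
    simp [hdbGo]
  | succ n ih =>
    intro i hi lindex prev count
    have hlt : i < elevation_histogram.length := by omega
    have hdrop : elevation_histogram.drop i
        = elevation_histogram[i] :: elevation_histogram.drop (i + 1) :=
      (List.getElem_cons_drop hlt).symm
    have hgd : elevation_histogram.getD i 0 = elevation_histogram[i] :=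
      List.getD_eq_getElem _ _ hlt
    rw [hdbLoop]
    simp only [hlt, dif_pos]
    rw [ih (i + 1) (by omega)]
    by_cases hlast : i + 1 < elevation_histogram.length
    · have hdrop2 : elevation_histogram.drop (i + 1)
          = elevation_histogram[i + 1] :: elevation_histogram.drop (i + 2) :=
        (List.getElem_cons_drop hlast).symm
      have hgd2 : elevation_histogram.getD (i + 1) 0 = elevation_histogram[i + 1] :=
        List.getD_eq_getElem _ _ hlast
      have hcond : i < elevation_histogram.length - 1 := by omega
      have hlen2 : elevation_histogram.drop (i + 2) = []
          ↔ i = elevation_histogram.length - 2 := by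
        rw [List.drop_eq_nil_iff]; omega
      rw [hdrop, hdrop2]
      simp only [hdbGo, hgd, hgd2, hcond, if_pos]
      have hc : count + (↑(i + 1) : Int) = count + (i : Int) + 1 := by push_cast; ring
      rw [hc]
      by_cases hx : elevation_histogram[i] < elevation_histogram[i + 1]
      · simp [hx]
      · by_cases he : elevation_histogram.drop (i + 2) = []
        · have hle : elevation_histogram.length ≤ elevation_histogram.length - 2 + 2 := by omega
          simp [he, hlen2.1 he, hle]
        · have : ¬ i = elevation_histogram.length - 2 := fun h => he (hlen2.2 h)
          simp [hx, he, this]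
    · have hi1 : i = elevation_histogram.length - 1 := by omega
      have hcond : ¬ i < elevation_histogram.length - 1 := by omega
      have hdrop2 : elevation_histogram.drop (i + 1) = [] := by
        rw [List.drop_eq_nil_iff]; omega
      rw [hdrop, hdrop2, hdbGo_single]
      simp [hcond, hdbGo]

lemma alt_eq_go (elevation_histogram lindex lvalue : List Int) (count : Int) :
    helper_drainage_basins_alt elevation_histogram lindex lvalue count
      = hdbGo elevation_histogram lindex lvalue.getLast? count := by
  unfold helper_drainage_basins_alt
  rw [loop_eq_go elevation_histogram elevation_histogram.length 0 (by omega)]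
  simp

-- ===== VERDICT (by name: the statement is the Claim_ definition above) =====
theorem helper_drainage_basins_spec : Claim_equal_helper_drainage_basins := by
  intro h lindex lvalue count _ hpre
  unfold Spec_helper_drainage_basins
  rw [alt_eq_go]
  by_cases hlv : lvalue = []
  · subst hlv
    obtain ⟨hne, hcorner⟩ := hpre
    match h with
    | [] => exact absurd rfl hne
    | [h0] => simp [helper_drainage_basins, hdbGo_single]
    | h0 :: h1 :: rest' =>
      rw [A_step]
      by_cases h01 : h0 < h1
      · have hli : lindex = [] := by
          by_contra hn
          exact hcorner ⟨rfl, hn, by simp, by simpa using h01⟩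
        have h1len : lindex.length < 1 := by simp [hli]
        rw [if_pos h01, if_pos h1len,
          A_eq_go (h1 :: rest') (lindex ++ [count + 1]) ([] ++ [h0]) (count + 1) (by simp)]
        simp [hdbGo, h01, hli]
      · by_cases hr : rest' = []
        · by_cases hgt : h0 > h1
          · rw [if_neg h01, if_pos hr, if_pos hgt,
              A_eq_go (h1 :: rest') _ ([] ++ [h0]) _ (by simp)]
            subst hr; simp [hdbGo, h01, hgt]
          · rw [if_neg h01, if_pos hr, if_neg hgt,
              A_eq_go (h1 :: rest') _ ([] ++ [h0]) _ (by simp)]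
            subst hr; simp [hdbGo, h01, hgt]
        · rw [if_neg h01, if_neg hr, A_eq_go (h1 :: rest') _ ([] ++ [h0]) _ (by simp)]
          simp [hdbGo, h01, hr]
  · exact A_eq_go h lindex lvalue count hlv
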